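-- pv_equiv track=rewrite | github.com/xiaojunzaizai/test | Degree Sequence.py | result
-- ===== SOURCE A (Python) =====
-- def new_I_degree_sequence(d,i,j):
--     i = i-1
--     j = j-1
--     sum = 0
--     for l in range(i,j+1):
--         sum = sum + abs(d[i] - d[l])
--
--     return sum
--
-- def DA(d,i,k,I):
--     if i <2*k:
--         return I[i-1]
--     else:
--         min = 10000000000000
--         for t in range(k,i-k+1):
--             sum = DA(d,t,k,I) + new_I_degree_sequence(d,t+1,i)
--             if sum < min:
--                 min = sum
--         if min <= I[i-1]:
--             return min
--         else:
--             return I[i-1]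
--
-- def result (nodes,k):
--     I = []
--     for i in range(1,len(nodes)+1):
--         I.append(new_I_degree_sequence(nodes,1,i))
--     da = []
--
--     for i in range(1,len(nodes)+1):
--         da.append(DA(nodes,i,k,I))
--
--     return I, da
-- ===== SOURCE B (Python) =====
-- def result(nodes, k):
--     # Bottom-up DP (each DA value computed once) with prefix-summed I and a lazily
--     # built, incrementally updated segment-cost array c.
--     n = len(nodes)
--     I = []
--     s = 0
--     for j in range(n):
--         s += abs(nodes[0] - nodes[j])
--         I.append(s)
--     da = []
--     c = None  # c[t] = sum_{l=t}^{i-1} |nodes[t]-nodes[l]|; built at the first i >= 2*k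
--     for i in range(1, n + 1):
--         if i < 2 * k:
--             da.append(I[i - 1])
--         else:
--             if c is None:
--                 c = [0] * n
--                 for t in range(i):
--                     s2 = 0
--                     for l in range(t, i):
--                         s2 += abs(nodes[t] - nodes[l])
--                     c[t] = s2
--             else:
--                 for t in range(i):
--                     c[t] += abs(nodes[t] - nodes[i - 1])
--             best = 10000000000000
--             for t in range(k, i - k + 1):
--                 v = da[t - 1] + c[t]
--                 if v < best:
--                     best = v
--             da.append(min(best, I[i - 1]))
--     return I, da
-- ===== Notes on version B (the rewrite author's own statement) =====
-- stated objective: faster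
-- what changed: Replaces the exponential top-down recursion DA with a bottom-up DP over i (each DA value computed once), builds I by a single prefix-sum pass, and maintains the segment costs in an array built lazily at the first i >= 2*k and updated incrementally afterwards; intended as faster (O(n) when 2*k > n, O(n^2) otherwise) - a timing run measured B many times faster at the largest size both finished, but could not confirm 'faster' overall since both programs time out on some very large inputs with small k.
import Mathlib
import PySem

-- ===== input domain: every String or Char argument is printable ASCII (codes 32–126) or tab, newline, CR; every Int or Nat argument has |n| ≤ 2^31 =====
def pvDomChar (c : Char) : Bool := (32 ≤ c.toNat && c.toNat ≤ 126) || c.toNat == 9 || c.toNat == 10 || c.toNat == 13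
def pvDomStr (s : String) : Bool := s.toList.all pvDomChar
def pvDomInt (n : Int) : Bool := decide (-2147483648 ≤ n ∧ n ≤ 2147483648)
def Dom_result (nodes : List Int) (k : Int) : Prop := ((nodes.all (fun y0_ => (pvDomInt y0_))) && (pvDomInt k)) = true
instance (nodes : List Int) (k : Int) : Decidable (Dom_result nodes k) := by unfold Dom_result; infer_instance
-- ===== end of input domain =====

-- B replaces A's exponential top-down DA recursion by a bottom-up DP with lazily built,
-- incrementally maintained segment costs (intended as faster; a timing run measured
-- B many times faster at the largest size both programs finished, unconfirmed overall
-- since both time out on some very large small-k inputs). Equivalence is claimed on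
-- Pre_ (empty list or k ≥ 1), outside of which Python A never returns (infinite recursion).

-- ===== PORT A =====
-- new_I_degree_sequence; d[...] accesses are ported with pyGetD (in range on every input
-- admitted by Pre_; Python would raise IndexError where pyGetD defaults)
def newI (d : List Int) (i j : Int) : Int :=
  let i' := i - 1
  let j' := j - 1
  (PySem.List.pyRange i' (j' + 1) 1).foldl
    (fun s l => s + |PySem.List.pyGetD d i' 0 - PySem.List.pyGetD d l 0|) 0

-- DA, totalized with a fuel parameter; the fuel-0 fallback 0 is unreachable under
-- Pre_result (Python's recursion terminates exactly when k ≥ 1, and depth ≤ i)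
def DAfuel (d : List Int) (k : Int) (I : List Int) : Nat → Int → Int
  | 0, i => if i < 2 * k then PySem.List.pyGetD I (i - 1) 0 else 0
  | fuel + 1, i =>
    if i < 2 * k then PySem.List.pyGetD I (i - 1) 0
    else
      let m := (PySem.List.pyRange k (i - k + 1) 1).foldl
        (fun m t =>
          let s := DAfuel d k I fuel t + newI d (t + 1) i
          if s < m then s else m) 10000000000000
      if m ≤ PySem.List.pyGetD I (i - 1) 0 then m else PySem.List.pyGetD I (i - 1) 0

def DA (d : List Int) (i k : Int) (I : List Int) : Int := DAfuel d k I i.toNat i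

def result (nodes : List Int) (k : Int) : List Int × List Int :=
  let I := (PySem.List.pyRange 1 ((nodes.length : Int) + 1) 1).foldl
    (fun acc i => acc ++ [newI nodes 1 i]) []
  let da := (PySem.List.pyRange 1 ((nodes.length : Int) + 1) 1).foldl
    (fun acc i => acc ++ [DA nodes i k I]) []
  (I, da)

-- ===== PORT B =====
def result_alt (nodes : List Int) (k : Int) : List Int × List Int :=
  let n := nodes.length
  let Ip := (PySem.List.pyRange 0 (n : Int) 1).foldl
    (fun (p : List Int × Int) j =>
      let s := p.2 + |PySem.List.pyGetD nodes 0 0 - PySem.List.pyGetD nodes j 0|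
      (p.1 ++ [s], s)) ([], 0)
  let I := Ip.1
  let st := (PySem.List.pyRange 1 ((n : Int) + 1) 1).foldl
    (fun (st : Option (List Int) × List Int) i =>
      if i < 2 * k then (st.1, st.2 ++ [PySem.List.pyGetD I (i - 1) 0])
      else
        let c := match st.1 with
          | none =>
            (PySem.List.pyRange 0 i 1).foldl
              (fun c t =>
                let s2 := (PySem.List.pyRange t i 1).foldl
                  (fun s2 l => s2 + |PySem.List.pyGetD nodes t 0 - PySem.List.pyGetD nodes l 0|) 0
                PySem.List.pySetD c t s2) (List.replicate n 0)
          | some c0 =>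
            (PySem.List.pyRange 0 i 1).foldl
              (fun c t => PySem.List.pySetD c t
                (PySem.List.pyGetD c t 0 +
                  |PySem.List.pyGetD nodes t 0 - PySem.List.pyGetD nodes (i - 1) 0|)) c0
        let best := (PySem.List.pyRange k (i - k + 1) 1).foldl
          (fun best t =>
            let v := PySem.List.pyGetD st.2 (t - 1) 0 + PySem.List.pyGetD c t 0
            if v < best then v else best) 10000000000000
        (some c, st.2 ++ [min best (PySem.List.pyGetD I (i - 1) 0)]))
    ((none : Option (List Int)), [])
  (I, st.2)

-- ===== PRECONDITION & SPEC =====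
-- Pre_ excludes only inputs on which Python A never returns: for a nonempty list and
-- k ≤ 0 the recursion DA(i) reaches DA(i) again (t ranges up to i-k ≥ i) and raises
-- RecursionError.
def Pre_result (nodes : List Int) (k : Int) : Prop := nodes = [] ∨ 1 ≤ k
instance (nodes : List Int) (k : Int) : Decidable (Pre_result nodes k) := by
  unfold Pre_result; infer_instance
def pvWitness_result : List Int × Int := ([3, 1, 4, 1, 5], 1)

def Spec_result (nodes : List Int) (k : Int) (out : List Int × List Int) : Prop := out = result_alt nodes k
instance (nodes : List Int) (k : Int) (out : List Int × List Int) : Decidable (Spec_result nodes k out) := by unfold Spec_result; infer_instance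

-- ===== CLAIM (what is proved, stated in full; the proofs are below) =====
def Claim_equal_result : Prop := ∀ (nodes : List Int) (k : Int), Dom_result nodes k → Pre_result nodes k → Spec_result nodes k (result nodes k)

-- ===== LEMMAS AND PROOFS =====

-- segment cost: sum_{l ∈ [t, i)} |d[t] - d[l]|
def cost (d : List Int) (t i : Int) : Int :=
  ((PySem.List.pyRange t i 1).map
    (fun l => |PySem.List.pyGetD d t 0 - PySem.List.pyGetD d l 0|)).sum

theorem newI_eq_cost (d : List Int) (i j : Int) : newI d i j = cost d (i - 1) j := by
  unfold newI cost
  rw [PySem.List.foldl_add]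
  simp [sub_add_cancel]

theorem DAfuel_irrel (d : List Int) (k : Int) (I : List Int) (hk : 1 ≤ k) :
    ∀ fuel fuel' (i : Int), i.toNat ≤ fuel → i.toNat ≤ fuel' →
      DAfuel d k I fuel i = DAfuel d k I fuel' i := by
  intro fuel
  induction fuel using Nat.strong_induction_on with
  | _ fuel IH =>
    intro fuel' i hf hf'
    by_cases hlt : i < 2 * k
    · cases fuel <;> cases fuel' <;> simp [DAfuel, hlt]
    · have hi : 2 ≤ i := by omega
      have hiN : 2 ≤ i.toNat := by omega
      obtain ⟨f, rfl⟩ : ∃ f, fuel = f + 1 := ⟨fuel - 1, by omega⟩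
      obtain ⟨f', rfl⟩ : ∃ f', fuel' = f' + 1 := ⟨fuel' - 1, by omega⟩
      simp only [DAfuel, hlt, if_false]
      have hfold : (PySem.List.pyRange k (i - k + 1) 1).foldl
          (fun m t => let s := DAfuel d k I f t + newI d (t + 1) i
            if s < m then s else m) 10000000000000
        = (PySem.List.pyRange k (i - k + 1) 1).foldl
          (fun m t => let s := DAfuel d k I f' t + newI d (t + 1) i
            if s < m then s else m) 10000000000000 := by
        apply PySem.List.foldl_congr_mem
        intro acc t ht
        rw [PySem.List.mem_pyRange_one] at ht
        have h1 : t.toNat ≤ f := by omega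
        have h2 : t.toNat ≤ f' := by omega
        simp only [IH f (by omega) f' t h1 h2]
      rw [hfold]

-- characterization of DA in the recursive branch
theorem DA_eq (d : List Int) (k : Int) (I : List Int) (hk : 1 ≤ k) (i : Int)
    (h : ¬ i < 2 * k) :
    DA d i k I =
      (let m := (PySem.List.pyRange k (i - k + 1) 1).foldl
        (fun m t => let s := DA d t k I + newI d (t + 1) i
          if s < m then s else m) 10000000000000
      if m ≤ PySem.List.pyGetD I (i - 1) 0 then m
      else PySem.List.pyGetD I (i - 1) 0) := by
  have hi : 2 ≤ i := by omega
  obtain ⟨f, hf⟩ : ∃ f, i.toNat = f + 1 := ⟨i.toNat - 1, by omega⟩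
  unfold DA
  rw [hf]
  simp only [DAfuel, h, if_false]
  have hfold : (PySem.List.pyRange k (i - k + 1) 1).foldl
      (fun m t => let s := DAfuel d k I f t + newI d (t + 1) i
        if s < m then s else m) 10000000000000
    = (PySem.List.pyRange k (i - k + 1) 1).foldl
      (fun m t => let s := DA d t k I + newI d (t + 1) i
        if s < m then s else m) 10000000000000 := by
    apply PySem.List.foldl_congr_mem
    intro acc t ht
    rw [PySem.List.mem_pyRange_one] at ht
    unfold DA
    simp only [DAfuel_irrel d k I hk f t.toNat t (by omega) (le_refl _)]
  rw [hfold]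
  rfl

theorem DA_base (d : List Int) (k : Int) (I : List Int) (i : Int) (h : i < 2 * k) :
    DA d i k I = PySem.List.pyGetD I (i - 1) 0 := by
  unfold DA
  cases hi : i.toNat <;> simp [DAfuel, h]


theorem cost_succ (d : List Int) (t i : Int) (h : t ≤ i) :
    cost d t (i + 1) = cost d t i + |PySem.List.pyGetD d t 0 - PySem.List.pyGetD d i 0| := by
  unfold cost
  rw [PySem.List.pyRange_one_succ_right h]
  simp

theorem cost_zero (d : List Int) (t i : Int) (h : i ≤ t) : cost d t i = 0 := by
  unfold cost
  rw [PySem.List.pyRange_one_eq_nil h]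
  simp

theorem pyGetD_replicate_zero (n : Nat) (t : Int) (h0 : 0 ≤ t) :
    PySem.List.pyGetD (List.replicate n (0 : Int)) t 0 = 0 := by
  rw [show t = ((t.toNat : Nat) : Int) by omega, PySem.List.pyGetD_natCast]
  simp [List.getD, List.getElem?_replicate]
  split <;> simp

-- the inner cost-update loop of B: a fold of in-place sets over range(m)
theorem setfold (g : Int → Int) (m : Nat) : ∀ (c : List Int), m ≤ c.length →
    (((PySem.List.pyRange 0 (m : Int) 1).foldl
       (fun c t => PySem.List.pySetD c t (PySem.List.pyGetD c t 0 + g t)) c).length = c.length)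
  ∧ ∀ t : Int, 0 ≤ t → t < c.length →
      PySem.List.pyGetD ((PySem.List.pyRange 0 (m : Int) 1).foldl
        (fun c t => PySem.List.pySetD c t (PySem.List.pyGetD c t 0 + g t)) c) t 0
      = if t < m then PySem.List.pyGetD c t 0 + g t else PySem.List.pyGetD c t 0 := by
  induction m with
  | zero =>
    intro c hm
    rw [PySem.List.pyRange_one_eq_nil (by omega)]
    refine ⟨rfl, ?_⟩
    intro t h0 h1
    rw [if_neg (by omega)]
    rfl
  | succ m IH =>
    intro c hm
    have h1 : ((m + 1 : Nat) : Int) = (m : Int) + 1 := by push_cast; ring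
    rw [h1, PySem.List.pyRange_one_succ_right (by omega), List.foldl_append]
    obtain ⟨IHlen, IHget⟩ := IH c (by omega)
    simp only [List.foldl_cons, List.foldl_nil]
    have hmlen : m < (((PySem.List.pyRange 0 (m : Int) 1).foldl
        (fun c t => PySem.List.pySetD c t (PySem.List.pyGetD c t 0 + g t)) c)).length := by
      rw [IHlen]; omega
    constructor
    · rw [PySem.List.length_pySetD, IHlen]
    · intro t h0 h2
      rw [show t = ((t.toNat : Nat) : Int) by omega] at h2 ⊢
      rw [PySem.List.pyGetD_pySetD_natCast _ m t.toNat _ _ hmlen]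
      by_cases he : t.toNat = m
      · rw [he] at h2 ⊢
        rw [if_pos rfl, IHget _ (by omega) h2, if_neg (by omega), if_pos (by omega)]
      · rw [if_neg he, IHget _ (by omega) h2]
        by_cases hl : ((t.toNat : Nat) : Int) < (m : Int)
        · rw [if_pos hl, if_pos (by omega)]
        · rw [if_neg hl, if_neg (by omega)]

-- the lazy initialization loop of B: assigns f t to slot t over range(m)
theorem assignfold (f : Int → Int) (n : Nat) : ∀ (m : Nat), m ≤ n →
    (((PySem.List.pyRange 0 (m : Int) 1).foldl
       (fun c t => PySem.List.pySetD c t (f t)) (List.replicate n 0)).length = n)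
  ∧ ∀ t : Int, 0 ≤ t → t < (n : Int) →
      PySem.List.pyGetD ((PySem.List.pyRange 0 (m : Int) 1).foldl
        (fun c t => PySem.List.pySetD c t (f t)) (List.replicate n 0)) t 0
      = if t < (m : Int) then f t else 0 := by
  intro m
  induction m with
  | zero =>
    intro _
    rw [show ((0:Nat):Int) = 0 from rfl, PySem.List.pyRange_one_eq_nil le_rfl]
    refine ⟨List.length_replicate, ?_⟩
    intro t h0 h1
    rw [if_neg (by omega)]
    exact pyGetD_replicate_zero n t h0
  | succ m IH =>
    intro hm
    obtain ⟨IHlen, IHget⟩ := IH (by omega)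
    have h1 : ((m + 1 : Nat) : Int) = (m : Int) + 1 := by push_cast; ring
    rw [h1, PySem.List.pyRange_one_succ_right (by omega), List.foldl_append]
    simp only [List.foldl_cons, List.foldl_nil]
    have hmlen : m < (((PySem.List.pyRange 0 (m : Int) 1).foldl
        (fun c t => PySem.List.pySetD c t (f t)) (List.replicate n 0))).length := by
      rw [IHlen]; omega
    refine ⟨by rw [PySem.List.length_pySetD, IHlen], ?_⟩
    intro t h0 h2
    rw [show t = ((t.toNat : Nat) : Int) by omega] at h2 ⊢
    rw [PySem.List.pyGetD_pySetD_natCast _ m t.toNat _ _ hmlen]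
    by_cases he : t.toNat = m
    · rw [he] at h2 ⊢
      rw [if_pos rfl, if_pos (by omega)]
    · rw [if_neg he, IHget _ (by omega) h2]
      by_cases hl : ((t.toNat : Nat) : Int) < (m : Int)
      · rw [if_pos hl, if_pos (by omega)]
      · rw [if_neg hl, if_neg (by omega)]

-- the I list both programs build
def Imap (nodes : List Int) : List Int :=
  (PySem.List.pyRange 1 ((nodes.length : Int) + 1) 1).map (fun i => newI nodes 1 i)

theorem A_I (nodes : List Int) :
    (PySem.List.pyRange 1 ((nodes.length : Int) + 1) 1).foldl
      (fun acc i => acc ++ [newI nodes 1 i]) [] = Imap nodes := by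
  rw [PySem.List.foldl_append_singleton_eq_map]
  rfl

theorem B_I (nodes : List Int) (n : Nat) :
    (PySem.List.pyRange 0 (n : Int) 1).foldl
      (fun (p : List Int × Int) j =>
        let s := p.2 + |PySem.List.pyGetD nodes 0 0 - PySem.List.pyGetD nodes j 0|
        (p.1 ++ [s], s)) ([], 0)
    = ((PySem.List.pyRange 1 ((n : Int) + 1) 1).map (fun i => newI nodes 1 i),
       cost nodes 0 (n : Int)) := by
  induction n with
  | zero =>
    rw [show ((0:Nat):Int) = 0 from rfl, PySem.List.pyRange_one_eq_nil le_rfl,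
        cost_zero nodes 0 0 le_rfl]
    simp [PySem.List.pyRange_one_eq_nil]
  | succ n IH =>
    have h1 : ((n + 1 : Nat) : Int) = (n : Int) + 1 := by push_cast; ring
    rw [h1]
    conv_lhs => rw [PySem.List.pyRange_one_succ_right (by omega)]
    rw [List.foldl_append, IH]
    simp only [List.foldl_cons, List.foldl_nil]
    rw [← cost_succ _ _ _ (by omega)]
    conv_rhs => rw [PySem.List.pyRange_one_succ_right (show (1:Int) ≤ (n:Int) + 1 by omega)]
    rw [List.map_append]
    have hnewi : newI nodes 1 ((n : Int) + 1) = cost nodes 0 ((n : Int) + 1) := by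
      rw [newI_eq_cost]; norm_num
    simp [hnewi]

-- the main loop of B maintains: da = the list of A's DA values, c = the segment costs
theorem Bloop (nodes : List Int) (k : Int) (hk : 1 ≤ k) (n : Nat) (hn : n = nodes.length) :
    ∀ i : Nat, i ≤ n →
    ∃ copt : Option (List Int),
      ((PySem.List.pyRange 1 ((i : Int) + 1) 1).foldl
        (fun (st : Option (List Int) × List Int) i =>
          if i < 2 * k then (st.1, st.2 ++ [PySem.List.pyGetD (Imap nodes) (i - 1) 0])
          else
            let c := match st.1 with
              | none =>
                (PySem.List.pyRange 0 i 1).foldl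
                  (fun c t =>
                    let s2 := (PySem.List.pyRange t i 1).foldl
                      (fun s2 l => s2 + |PySem.List.pyGetD nodes t 0 - PySem.List.pyGetD nodes l 0|) 0
                    PySem.List.pySetD c t s2) (List.replicate n 0)
              | some c0 =>
                (PySem.List.pyRange 0 i 1).foldl
                  (fun c t => PySem.List.pySetD c t
                    (PySem.List.pyGetD c t 0 +
                      |PySem.List.pyGetD nodes t 0 - PySem.List.pyGetD nodes (i - 1) 0|)) c0
            let best := (PySem.List.pyRange k (i - k + 1) 1).foldl
              (fun best t =>
                let v := PySem.List.pyGetD st.2 (t - 1) 0 + PySem.List.pyGetD c t 0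
                if v < best then v else best) 10000000000000
            (some c, st.2 ++ [min best (PySem.List.pyGetD (Imap nodes) (i - 1) 0)]))
        ((none : Option (List Int)), []))
      = (copt, (PySem.List.pyRange 1 ((i : Int) + 1) 1).map (fun j => DA nodes j k (Imap nodes)))
      ∧ ((i : Int) < 2 * k → copt = none)
      ∧ (¬ (i : Int) < 2 * k → ∃ c, copt = some c ∧ c.length = n ∧
          ∀ t : Int, 0 ≤ t → t < (n : Int) → PySem.List.pyGetD c t 0 = cost nodes t (i : Int)) := by
  intro i
  induction i with
  | zero =>
    intro _
    refine ⟨none, ?_, fun _ => rfl, fun h => absurd (by omega : ((0:Nat):Int) < 2 * k) h⟩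
    rw [show ((0:Nat):Int) + 1 = 1 by norm_num, PySem.List.pyRange_one_eq_nil le_rfl]
    rfl
  | succ i IH =>
    intro hin
    obtain ⟨copt, hfold, hnone, hsome⟩ := IH (by omega)
    have hip : ((i + 1 : Nat) : Int) = (i : Int) + 1 := by push_cast; ring
    rw [← hip] at hfold
    have hsplit : PySem.List.pyRange 1 (((i+1:Nat):Int) + 1) 1
        = PySem.List.pyRange 1 ((i+1:Nat):Int) 1 ++ [((i+1:Nat):Int)] :=
      PySem.List.pyRange_one_succ_right (by omega)
    rw [hsplit, List.foldl_append, hfold]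
    simp only [List.foldl_cons, List.foldl_nil]
    by_cases hbr : ((i+1:Nat):Int) < 2 * k
    · rw [if_pos hbr, hnone (by omega)]
      refine ⟨none, ?_, fun _ => rfl, fun h => absurd hbr h⟩
      rw [hip, List.map_append]
      simp only [List.map_cons, List.map_nil]
      rw [DA_base nodes k (Imap nodes) ((i:Int)+1) (by omega)]
    · rw [if_neg hbr]
      by_cases hprev : (i : Int) < 2 * k
      · -- first activation: the cost list is built from scratch
        rw [hnone hprev]
        obtain ⟨hlen', hget'⟩ := assignfold
          (fun t => (PySem.List.pyRange t ((i+1:Nat):Int) 1).foldl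
            (fun s2 l => s2 + |PySem.List.pyGetD nodes t 0 - PySem.List.pyGetD nodes l 0|) 0)
          n (i + 1) (by omega)
        set c' := (PySem.List.pyRange 0 ((i+1:Nat):Int) 1).foldl
          (fun c t =>
            let s2 := (PySem.List.pyRange t ((i+1:Nat):Int) 1).foldl
              (fun s2 l => s2 + |PySem.List.pyGetD nodes t 0 - PySem.List.pyGetD nodes l 0|) 0
            PySem.List.pySetD c t s2) (List.replicate n 0) with hc'
        have hc'get : ∀ t : Int, 0 ≤ t → t < (n : Int) →
            PySem.List.pyGetD c' t 0 = cost nodes t ((i + 1 : Nat) : Int) := by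
          intro t h0 h1
          rw [hget' t h0 h1]
          have hf : (PySem.List.pyRange t ((i+1:Nat):Int) 1).foldl
              (fun s2 l => s2 + |PySem.List.pyGetD nodes t 0 - PySem.List.pyGetD nodes l 0|) 0
              = cost nodes t ((i+1:Nat):Int) := by
            unfold cost
            rw [PySem.List.foldl_add]
            simp
          by_cases hlt : t < ((i+1:Nat):Int)
          · rw [if_pos hlt, hf]
          · rw [if_neg hlt, cost_zero nodes t _ (by omega)]
        refine ⟨some c', ?_, fun h => absurd h hbr,
          fun _ => ⟨c', rfl, by rw [hlen'], fun t a b => by rw [hc'get t a b]⟩⟩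
        have hbest : (PySem.List.pyRange k (((i+1:Nat):Int) - k + 1) 1).foldl
            (fun best t =>
              let v := PySem.List.pyGetD
                  (List.map (fun j => DA nodes j k (Imap nodes))
                    (PySem.List.pyRange 1 ((i+1:Nat):Int) 1))
                  (t - 1) 0 + PySem.List.pyGetD c' t 0
              if v < best then v else best) 10000000000000
          = (PySem.List.pyRange k (((i+1:Nat):Int) - k + 1) 1).foldl
            (fun m t =>
              let s := DA nodes t k (Imap nodes) + newI nodes (t + 1) ((i+1:Nat):Int)
              if s < m then s else m) 10000000000000 := by
          apply PySem.List.foldl_congr_mem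
          intro acc t ht
          rw [PySem.List.mem_pyRange_one] at ht
          have hda : PySem.List.pyGetD
              (List.map (fun j => DA nodes j k (Imap nodes))
                (PySem.List.pyRange 1 ((i+1:Nat):Int) 1))
              (t - 1) 0 = DA nodes t k (Imap nodes) := by
            rw [show t - 1 = (((t-1).toNat : Nat) : Int) by omega]
            rw [PySem.List.pyGetD_map_pyRange_one _ _ _ _ _ (by omega)]
            congr 1
            omega
          have hcost : PySem.List.pyGetD c' t 0 = newI nodes (t + 1) ((i+1:Nat):Int) := by
            rw [hc'get t (by omega) (by omega), newI_eq_cost]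
            norm_num
          rw [hda, hcost]
        rw [hbest, hip, List.map_append]
        simp only [List.map_cons, List.map_nil]
        rw [DA_eq nodes k (Imap nodes) hk ((i:Int)+1) (by omega)]
        rw [min_def]
      · -- steady state: the cost list is updated in place
        obtain ⟨c0, hc0eq, hlen0, hget0⟩ := hsome hprev
        rw [hc0eq]
        obtain ⟨hlen', hget'⟩ := setfold
          (fun t => |PySem.List.pyGetD nodes t 0 - PySem.List.pyGetD nodes (((i+1:Nat):Int) - 1) 0|)
          (i + 1) c0 (by omega)
        set c' := (PySem.List.pyRange 0 ((i+1:Nat):Int) 1).foldl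
          (fun c t => PySem.List.pySetD c t
            (PySem.List.pyGetD c t 0 +
              |PySem.List.pyGetD nodes t 0 - PySem.List.pyGetD nodes (((i+1:Nat):Int) - 1) 0|)) c0
          with hc'
        have hc'get : ∀ t : Int, 0 ≤ t → t < (n : Int) →
            PySem.List.pyGetD c' t 0 = cost nodes t ((i + 1 : Nat) : Int) := by
          intro t h0 h1
          rw [hget' t h0 (by omega), hip]
          by_cases hlt : t < (i : Int) + 1
          · rw [if_pos (by omega), hget0 t h0 h1,
                show (i:Int) + 1 - 1 = (i:Int) by ring,
                ← cost_succ nodes t (i:Int) (by omega)]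
          · rw [if_neg (by omega), hget0 t h0 h1, cost_zero nodes t ((i:Int)+1) (by omega),
                cost_zero nodes t (i:Int) (by omega)]
        refine ⟨some c', ?_, fun h => absurd h hbr,
          fun _ => ⟨c', rfl, by rw [hlen', hlen0], fun t a b => by rw [hc'get t a b]⟩⟩
        have hbest : (PySem.List.pyRange k (((i+1:Nat):Int) - k + 1) 1).foldl
            (fun best t =>
              let v := PySem.List.pyGetD
                  (List.map (fun j => DA nodes j k (Imap nodes))
                    (PySem.List.pyRange 1 ((i+1:Nat):Int) 1))
                  (t - 1) 0 + PySem.List.pyGetD c' t 0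
              if v < best then v else best) 10000000000000
          = (PySem.List.pyRange k (((i+1:Nat):Int) - k + 1) 1).foldl
            (fun m t =>
              let s := DA nodes t k (Imap nodes) + newI nodes (t + 1) ((i+1:Nat):Int)
              if s < m then s else m) 10000000000000 := by
          apply PySem.List.foldl_congr_mem
          intro acc t ht
          rw [PySem.List.mem_pyRange_one] at ht
          have hda : PySem.List.pyGetD
              (List.map (fun j => DA nodes j k (Imap nodes))
                (PySem.List.pyRange 1 ((i+1:Nat):Int) 1))
              (t - 1) 0 = DA nodes t k (Imap nodes) := by
            rw [show t - 1 = (((t-1).toNat : Nat) : Int) by omega]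
            rw [PySem.List.pyGetD_map_pyRange_one _ _ _ _ _ (by omega)]
            congr 1
            omega
          have hcost : PySem.List.pyGetD c' t 0 = newI nodes (t + 1) ((i+1:Nat):Int) := by
            rw [hc'get t (by omega) (by omega), newI_eq_cost]
            norm_num
          rw [hda, hcost]
        rw [hbest, hip, List.map_append]
        simp only [List.map_cons, List.map_nil]
        rw [DA_eq nodes k (Imap nodes) hk ((i:Int)+1) (by omega)]
        rw [min_def]
        rfl

-- ===== VERDICT (by name: the statement is the Claim_ definition above) =====
theorem result_spec : Claim_equal_result := by
  intro nodes k _ hpre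
  unfold Spec_result
  rcases hpre with hnil | hk
  · subst hnil
    simp [result, result_alt, PySem.List.pyRange_one_eq_nil]
  · obtain ⟨c, hfold, -, -⟩ := Bloop nodes k hk nodes.length rfl nodes.length le_rfl
    simp only [result, result_alt]
    rw [A_I, PySem.List.foldl_append_singleton_eq_map, B_I nodes nodes.length]
    have h2 : (List.map (fun i => newI nodes 1 i)
        (PySem.List.pyRange 1 ((nodes.length : Int) + 1) 1)) = Imap nodes := rfl
    rw [h2]
    refine Prod.ext rfl ?_
    rw [List.nil_append]
    exact (congrArg Prod.snd hfold).symm
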